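-- pv_equiv track=rewrite | github.com/fujihiraryo/pgbattle | 2021/2_2.py | max_ans
-- ===== SOURCE A (Python) =====
-- def max_ans(n, m):
--     l = 0
--     r = 10**10
--     while r - l > 1:
--         c = (l + r) // 2
--         if m <= c * (c - 1) // 2:
--             r = c
--         else:
--             l = c
--     return n - r + 1
-- ===== SOURCE B (Python) =====
-- def max_ans(n, m):
--     c = 1
--     while c * (c - 1) // 2 < m:
--         c += 1
--     return n - c + 1
-- ===== Notes on version B (the rewrite author's own statement) =====
-- stated objective: simpler
-- what changed: Replaces the fixed-bounds binary search over [0, 10**10] with a direct linear scan for the smallest c with c*(c-1)//2 >= m, which is shorter and plainer.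
import Mathlib
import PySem

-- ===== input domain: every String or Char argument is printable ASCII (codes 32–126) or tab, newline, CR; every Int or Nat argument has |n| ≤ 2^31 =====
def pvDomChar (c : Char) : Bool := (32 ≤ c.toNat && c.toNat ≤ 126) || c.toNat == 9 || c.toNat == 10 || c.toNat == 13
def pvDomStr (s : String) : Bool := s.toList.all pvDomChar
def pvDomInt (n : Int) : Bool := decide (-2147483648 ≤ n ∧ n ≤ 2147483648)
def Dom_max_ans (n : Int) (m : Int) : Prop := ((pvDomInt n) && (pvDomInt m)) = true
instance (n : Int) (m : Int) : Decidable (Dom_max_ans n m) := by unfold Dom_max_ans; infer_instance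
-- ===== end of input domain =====

-- B replaces A's fixed-bounds binary search over [0, 10^10] by a plain linear scan for the
-- smallest c with c*(c-1)//2 >= m (simpler, not faster); return values agree on the whole domain.

-- ===== PORT A =====
-- while r - l > 1: c = (l+r)//2; if m <= c*(c-1)//2: r = c else: l = c
-- (fuel is only a structural-termination guard: the loop always runs ≤ 34 halvings of the
--  fixed interval [0, 10^10], so fuel 64 is never exhausted on any input)
def maxAnsGo (m : Int) : Int → Int → Nat → Int
  | _, r, 0 => r
  | l, r, fuel + 1 =>
    if r - l > 1 then
      let c := PySem.Int.floordiv (l + r) 2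
      if m ≤ PySem.Int.floordiv (c * (c - 1)) 2 then
        maxAnsGo m l c fuel
      else
        maxAnsGo m c r fuel
    else r

def max_ans (n : Int) (m : Int) : Int := n - maxAnsGo m 0 10000000000 64 + 1

-- ===== PORT B =====
-- c = 1; while c*(c-1)//2 < m: c += 1   (fuel bounds the loop; it is never exhausted on Dom)
def maxAnsAltGo (m c : Int) : Nat → Int
  | 0 => c
  | fuel + 1 =>
    if PySem.Int.floordiv (c * (c - 1)) 2 < m then maxAnsAltGo m (c + 1) fuel else c

def max_ans_alt (n : Int) (m : Int) : Int := n - maxAnsAltGo m 1 1048576 + 1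

-- ===== PRECONDITION & SPEC =====
def Spec_max_ans (n : Int) (m : Int) (out : Int) : Prop := out = max_ans_alt n m
instance (n : Int) (m : Int) (out : Int) : Decidable (Spec_max_ans n m out) := by unfold Spec_max_ans; infer_instance

-- ===== CLAIM (what is proved, stated in full; the proofs are below) =====
def Claim_equal_max_ans : Prop := ∀ (n : Int) (m : Int), Dom_max_ans n m → Spec_max_ans n m (max_ans n m)

-- ===== LEMMAS AND PROOFS =====

-- T m c: "m ≤ c*(c-1)//2"  (the search predicate; `/` below is Int.ediv = floordiv for divisor 2)
abbrev pvT (m c : Int) : Prop := m ≤ c * (c - 1) / 2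

theorem pvT_floordiv (m c : Int) : (m ≤ PySem.Int.floordiv (c * (c - 1)) 2) ↔ pvT m c := by
  rw [PySem.Int.floordiv_eq_ediv_of_pos (show (0:Int) < 2 by norm_num)]

theorem pvT_ex (m : Int) : ∃ k : Nat, pvT m ((k : Int) + 1) := by
  by_cases h : m ≤ 0
  · exact ⟨0, by unfold pvT; omega⟩
  · refine ⟨m.toNat, ?_⟩
    unfold pvT
    have hm1 : 1 ≤ m := by omega
    rw [Int.toNat_of_nonneg (by omega)]
    have h2 : m * 2 ≤ (m + 1) * ((m + 1) - 1) := by nlinarith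
    omega

-- the smallest c ≥ 1 with pvT m c
def pvS (m : Int) : Int := (Nat.find (pvT_ex m) : Int) + 1

theorem pvS_pos (m : Int) : 1 ≤ pvS m := by unfold pvS; omega

theorem pvS_spec (m : Int) : pvT m (pvS m) := Nat.find_spec (pvT_ex m)

theorem pvS_min (m c : Int) (h1 : 1 ≤ c) (h2 : c < pvS m) : ¬ pvT m c := by
  have hk : ((c - 1).toNat : Int) = c - 1 := Int.toNat_of_nonneg (by omega)
  have hlt : (c - 1).toNat < Nat.find (pvT_ex m) := by
    unfold pvS at h2; omega
  have := Nat.find_min (pvT_ex m) hlt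
  have he : ((c - 1).toNat : Int) + 1 = c := by omega
  rwa [he] at this

theorem pvT_mono (m c c' : Int) (h0 : 0 ≤ c) (hle : c ≤ c') (h : pvT m c) : pvT m c' := by
  unfold pvT at *
  have hnum : c * (c - 1) ≤ c' * (c' - 1) := by
    by_cases hc' : c' ≤ 0
    · have : c = 0 := by omega
      have : c' = 0 := by omega
      simp_all
    · have h1 : 1 ≤ c' := by omega
      nlinarith [mul_nonneg (sub_nonneg.mpr hle) (show (0:Int) ≤ c' + c - 1 by omega)]
  exact le_trans h (Int.ediv_le_ediv (show (0:Int) < 2 by norm_num) hnum)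

theorem pvS_le (m b : Int) (h1 : 1 ≤ b) (h : pvT m b) : pvS m ≤ b := by
  by_contra hc
  exact pvS_min m b h1 (by omega) h

theorem goA_eq (m : Int) : ∀ (fuel : Nat) (l r : Int), r - l ≤ 2 ^ fuel →
    0 ≤ l → l < pvS m → pvS m ≤ r → maxAnsGo m l r fuel = pvS m := by
  intro fuel
  induction fuel with
  | zero =>
    intro l r hN h0 hl hr
    norm_num at hN
    simp only [maxAnsGo]
    omega
  | succ fuel ih =>
    intro l r hN h0 hl hr
    have hpow : (2:Int) ^ (fuel + 1) = 2 * 2 ^ fuel := by ring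
    have hBpos : (0:Int) < 2 ^ fuel := pow_pos (by norm_num) fuel
    rw [hpow] at hN
    rw [maxAnsGo]
    by_cases hgt : r - l > 1
    · simp only [hgt, if_pos]
      have hc2 : PySem.Int.floordiv (l + r) 2 = (l + r) / 2 :=
        PySem.Int.floordiv_eq_ediv_of_pos (show (0:Int) < 2 by norm_num)
      set c := PySem.Int.floordiv (l + r) 2 with hcdef
      have hlc : l < c := by omega
      have hcr : c < r := by omega
      by_cases hT : m ≤ PySem.Int.floordiv (c * (c - 1)) 2
      · simp only [hT, if_pos]
        have hTc : pvT m c := (pvT_floordiv m c).mp hT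
        have hSc : pvS m ≤ c := pvS_le m c (by omega) hTc
        exact ih l c (by omega) h0 hl hSc
      · simp only [hT, if_neg, not_false_iff]
        have hcS : c < pvS m := by
          by_contra hcc
          exact hT ((pvT_floordiv m c).mpr
            (pvT_mono m (pvS m) c (by have := pvS_pos m; omega) (by omega) (pvS_spec m)))
        exact ih c r (by omega) (by omega) hcS hr
    · simp only [hgt, if_neg, not_false_iff]
      omega

theorem goB_eq (m : Int) : ∀ (fuel : Nat) (c : Int), 1 ≤ c → c ≤ pvS m →
    (pvS m - c).toNat < fuel → maxAnsAltGo m c fuel = pvS m := by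
  intro fuel
  induction fuel with
  | zero => intro c h1 h2 h3; exfalso; omega
  | succ fuel ih =>
    intro c h1 h2 h3
    rw [maxAnsAltGo]
    by_cases hT : PySem.Int.floordiv (c * (c - 1)) 2 < m
    · simp only [hT, if_pos]
      have hnT : ¬ pvT m c := by
        rw [← pvT_floordiv]; omega
      have hcS : c < pvS m := by
        rcases lt_or_eq_of_le h2 with h | h
        · exact h
        · exact absurd (h ▸ pvS_spec m) hnT
      exact ih (c + 1) (by omega) (by omega) (by omega)
    · simp only [hT, if_neg, not_false_iff]
      have hTc : pvT m c := by rw [← pvT_floordiv]; omega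
      have := pvS_le m c h1 hTc
      omega

-- ===== VERDICT (by name: the statement is the Claim_ definition above) =====
theorem max_ans_spec : Claim_equal_max_ans := by
  intro n m hDom
  have hm : -2147483648 ≤ m ∧ m ≤ 2147483648 := by
    simp only [Dom_max_ans, pvDomInt, Bool.and_eq_true, decide_eq_true_eq] at hDom
    exact hDom.2
  have hS1 : 1 ≤ pvS m := pvS_pos m
  have hT17 : pvT m 131072 := by unfold pvT; norm_num; omega
  have hS17 : pvS m ≤ 131072 := pvS_le m 131072 (by norm_num) hT17
  have hA : maxAnsGo m 0 10000000000 64 = pvS m :=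
    goA_eq m 64 0 10000000000 (by norm_num) (by norm_num) (by omega) (by omega)
  have hB : maxAnsAltGo m 1 1048576 = pvS m :=
    goB_eq m 1048576 1 (by norm_num) (by omega) (by omega)
  unfold Spec_max_ans max_ans max_ans_alt
  rw [hA, hB]
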